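-- pv_equiv track=rewrite | github.com/levivanveen/CP312 | A4/q2.py | min_weight_coins
-- ===== SOURCE A (Python) =====
-- def min_weight_coins(d, w, v):
--   coins = [None] * (v + 1)
--   coins[0] = 0
--   for i in range(1, v + 1):
--     min = 1000000
--     for j in range(len(d)):
--       # If the coin is smaller than the value and the weight is smaller than the current min
--       if d[j] <= i and coins[i - d[j]] + w[j] < min:
--         min = coins[i - d[j]] + w[j]
--     coins[i] = min
--   return coins[v]
-- ===== SOURCE B (Python) =====
-- def min_weight_coins(d, w, v):
--   # Phase 1: collect exactly the subproblem values reachable from v by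
--   # subtracting positive denominations (the only subproblems the DP ever reads).
--   needed = {v}
--   frontier = [v]
--   while frontier:
--     i = frontier.pop()
--     for dj in d:
--       if 0 < dj <= i:
--         k = i - dj
--         if k not in needed:
--           needed.add(k)
--           frontier.append(k)
--   # Phase 2: solve the needed subproblems in increasing order.
--   memo = {}
--   for i in sorted(needed):
--     if i == 0:
--       memo[i] = 0
--     else:
--       best = 1000000
--       for dj, wj in zip(d, w):
--         if dj <= i:
--           best = min(best, memo[i - dj] + wj)
--       memo[i] = best
--   return memo[v]
-- ===== Notes on version B (the rewrite author's own statement) =====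
-- stated objective: alternative
-- what changed: Replaces A's bottom-up table over every value 0..v by a top-down decomposition: phase 1 collects exactly the subproblem values reachable from v by subtracting positive denominations, phase 2 solves only those subproblems in increasing order in a memo dict; the sentinel arithmetic (1000000 propagation) is preserved exactly.
import Mathlib
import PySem

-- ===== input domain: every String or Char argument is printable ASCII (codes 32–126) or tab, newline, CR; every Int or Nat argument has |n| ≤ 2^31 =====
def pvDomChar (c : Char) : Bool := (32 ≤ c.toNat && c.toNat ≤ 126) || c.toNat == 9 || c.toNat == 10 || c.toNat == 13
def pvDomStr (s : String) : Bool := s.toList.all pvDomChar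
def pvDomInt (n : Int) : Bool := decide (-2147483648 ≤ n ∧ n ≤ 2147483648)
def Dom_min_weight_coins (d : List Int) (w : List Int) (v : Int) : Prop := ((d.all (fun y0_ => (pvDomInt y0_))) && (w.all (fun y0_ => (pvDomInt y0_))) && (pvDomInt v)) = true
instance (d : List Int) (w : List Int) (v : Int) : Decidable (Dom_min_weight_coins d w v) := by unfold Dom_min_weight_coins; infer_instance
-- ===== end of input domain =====

-- B replaces A's bottom-up table over all of 0..v by a top-down decomposition (reachable
-- subproblems first, then solved in increasing order); objective: alternative algorithm.

-- ===== PORT A =====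
-- inner loop 'for j in range(len(d)): …' of A (the running minimum 'min')
def pvStepA (d w coins : List Int) (i : Int) : Int :=
  (PySem.List.pyRange 0 (d.length : Int) 1).foldl (fun m j =>
    if PySem.List.pyGetD d j 0 ≤ i ∧
        PySem.List.pyGetD coins (i - PySem.List.pyGetD d j 0) 0 + PySem.List.pyGetD w j 0 < m then
      PySem.List.pyGetD coins (i - PySem.List.pyGetD d j 0) 0 + PySem.List.pyGetD w j 0
    else m) 1000000

-- the coins table: cell 0 holds 0, the loop 'for i in range(1, v+1)' appends cell i
-- (Python's [None]*(v+1) cells are represented by the computed prefix; inside Pre_ only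
-- already-computed cells are ever read, exactly as in the Python)
def pvTblA (d w : List Int) (v : Int) : List Int :=
  (PySem.List.pyRange 1 (v + 1) 1).foldl (fun coins i => coins ++ [pvStepA d w coins i]) [0]

def min_weight_coins (d : List Int) (w : List Int) (v : Int) : Int :=
  PySem.List.pyGetD (pvTblA d w v) v 0

-- ===== PORT B =====
-- body of the inner 'for dj in d' loop of phase 1
def pvCloseStep (i : Int) (acc : PySem.Set Int × List Int) (dj : Int) : PySem.Set Int × List Int :=
  if 0 < dj ∧ dj ≤ i then
    if PySem.Set.contains acc.1 (i - dj) then acc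
    else (PySem.Set.add acc.1 (i - dj), acc.2 ++ [i - dj])
  else acc

-- phase 1: 'while frontier: i = frontier.pop(); …'; fuel is only a totality guard
-- (proved never exhausted for 0 ≤ v)
def pvClose (d : List Int) : Nat → PySem.Set Int → List Int → PySem.Set Int × List Int
  | _, needed, [] => (needed, [])
  | 0, needed, frontier => (needed, frontier)
  | fuel + 1, needed, x :: xs =>
    let i := (x :: xs).getLast (by simp)
    let st := d.foldl (pvCloseStep i) (needed, (x :: xs).dropLast)
    pvClose d fuel st.1 st.2

-- phase 2 inner loop 'for dj, wj in zip(d, w): …' (the running minimum 'best')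
def pvStepB (d w : List Int) (f : Int → Int) (i : Int) : Int :=
  (d.zip w).foldl (fun best p => if p.1 ≤ i then min best (f (i - p.1) + p.2) else best) 1000000

-- phase 2 loop body: 'if i == 0: memo[i] = 0 else: … memo[i] = best'
def pvP2Step (d w : List Int) (memo : PySem.Dict Int Int) (i : Int) : PySem.Dict Int Int :=
  if i = 0 then memo.insert i 0
  else memo.insert i (pvStepB d w (fun k => memo.getD k 0) i)

def min_weight_coins_alt (d : List Int) (w : List Int) (v : Int) : Int :=
  let needed := (pvClose d (2 * v.toNat + 3) (PySem.Set.ofList [v]) [v]).1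
  let memo := (PySem.List.sorted needed (fun x => x) false).foldl (pvP2Step d w) PySem.Dict.empty
  memo.getD v 0

-- ===== PRECONDITION & SPEC =====
-- Pre_ excludes exactly the inputs where the Python A raises: v < 0 (coins[0] = 0 is an
-- IndexError on a too-short list), and v ≥ 1 together with some denomination d[j] ≤ v that
-- is nonpositive (reads an unfilled None cell / out of range) or has no weight w[j].
def Pre_min_weight_coins (d : List Int) (w : List Int) (v : Int) : Prop :=
  0 ≤ v ∧ (v = 0 ∨ ∀ j : Nat, j < d.length → d.getD j 0 ≤ v → 0 < d.getD j 0 ∧ j < w.length)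
instance (d : List Int) (w : List Int) (v : Int) : Decidable (Pre_min_weight_coins d w v) := by
  unfold Pre_min_weight_coins; infer_instance

def pvWitness_min_weight_coins : List Int × List Int × Int := ([1, 3], [2, 4], 7)

def Spec_min_weight_coins (d : List Int) (w : List Int) (v : Int) (out : Int) : Prop := out = min_weight_coins_alt d w v
instance (d : List Int) (w : List Int) (v : Int) (out : Int) : Decidable (Spec_min_weight_coins d w v out) := by unfold Spec_min_weight_coins; infer_instance

-- ===== CLAIM (what is proved, stated in full; the proofs are below) =====
def Claim_equal_min_weight_coins : Prop := ∀ (d : List Int) (w : List Int) (v : Int), Dom_min_weight_coins d w v → Pre_min_weight_coins d w v → Spec_min_weight_coins d w v (min_weight_coins d w v)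

-- ===== LEMMAS AND PROOFS =====

-- the value A's table holds at cell k
def pvG (d w : List Int) (k : Nat) : Int := (pvTblA d w (k : Int)).getD k 0

-- invariant of B's phase-1 loop: S is the set so far, fr the pending frontier
def pvInv (d : List Int) (v : Int) (S fr : List Int) : Prop :=
  S.Nodup ∧ fr.Nodup ∧ (∀ x ∈ fr, x ∈ S) ∧ (∀ x ∈ S, 0 ≤ x ∧ x ≤ v) ∧
  (∀ x ∈ S, x ∉ fr → ∀ dj ∈ d, 0 < dj → dj ≤ x → x - dj ∈ S)

theorem pvTblA_succ (d w : List Int) (n : Nat) :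
    pvTblA d w ((n : Int) + 1) = pvTblA d w n ++ [pvStepA d w (pvTblA d w n) ((n : Int) + 1)] := by
  unfold pvTblA
  rw [PySem.List.pyRange_one_succ_right (by omega), List.foldl_append]
  rfl

theorem length_pvTblA (d w : List Int) (n : Nat) : (pvTblA d w (n : Int)).length = n + 1 := by
  induction n with
  | zero => simp [pvTblA, PySem.List.pyRange_one_eq_nil]
  | succ n ih => push_cast; rw [pvTblA_succ]; simp [ih]

theorem getD_pvTblA (d w : List Int) (n k : Nat) (hk : k ≤ n) :
    (pvTblA d w (n : Int)).getD k 0 = pvG d w k := by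
  induction n with
  | zero => interval_cases k; rfl
  | succ n ih =>
    rcases Nat.lt_or_ge k (n+1) with h | h
    · push_cast; rw [pvTblA_succ]
      rw [List.getD_eq_getElem?_getD, List.getElem?_append_left (by rw [length_pvTblA]; omega)]
      rw [← List.getD_eq_getElem?_getD]
      exact ih (by omega)
    · have : k = n + 1 := by omega
      subst this
      rfl

theorem pvG_zero (d w : List Int) : pvG d w 0 = 0 := by
  simp [pvG, pvTblA, PySem.List.pyRange_one_eq_nil]

theorem pvG_succ (d w : List Int) (n : Nat) :
    pvG d w (n + 1) = pvStepA d w (pvTblA d w (n : Int)) ((n : Int) + 1) := by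
  unfold pvG
  push_cast
  rw [pvTblA_succ]
  rw [List.getD_eq_getElem?_getD, List.getElem?_append_right (by rw [length_pvTblA])]
  simp [length_pvTblA]

theorem pvGetD_tail (w : List Int) (j : Nat) : w.getD (j+1) 0 = w.tail.getD j 0 := by
  cases w <;> simp [List.getD]



theorem pvStepAux (coins : List Int) (i : Int) (f : Int → Int) :
    ∀ (d w : List Int) (m : Int),
    (∀ j : Nat, j < d.length → d.getD j 0 ≤ i →
      j < w.length ∧ PySem.List.pyGetD coins (i - d.getD j 0) 0 = f (i - d.getD j 0)) →
    (List.range d.length).foldl (fun m j =>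
        if d.getD j 0 ≤ i ∧ PySem.List.pyGetD coins (i - d.getD j 0) 0 + w.getD j 0 < m
        then PySem.List.pyGetD coins (i - d.getD j 0) 0 + w.getD j 0 else m) m
      = (d.zip w).foldl (fun m p => if p.1 ≤ i then min m (f (i - p.1) + p.2) else m) m := by
  intro d
  induction d with
  | nil => intro w m hw; simp
  | cons x tl ih =>
    intro w m hw
    rw [List.length_cons, List.range_succ_eq_map, List.foldl_cons, List.foldl_map]
    have hwtl : ∀ j : Nat, j < tl.length → tl.getD j 0 ≤ i →
        j < w.tail.length ∧ PySem.List.pyGetD coins (i - tl.getD j 0) 0 = f (i - tl.getD j 0) := by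
      intro j hj ht
      obtain ⟨h1, h2⟩ := hw (j+1) (by simp; omega) (by simpa using ht)
      refine ⟨?_, by simpa using h2⟩
      cases w with
      | nil => simp at h1
      | cons y w' => simpa using h1
    have hshift : ∀ m0 : Int, (List.range tl.length).foldl (fun m (j : Nat) =>
        if (x :: tl).getD (j+1) 0 ≤ i ∧
            PySem.List.pyGetD coins (i - (x :: tl).getD (j+1) 0) 0 + w.getD (j+1) 0 < m
        then PySem.List.pyGetD coins (i - (x :: tl).getD (j+1) 0) 0 + w.getD (j+1) 0 else m) m0
        = (tl.zip w.tail).foldl (fun m p => if p.1 ≤ i then min m (f (i - p.1) + p.2) else m) m0 := by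
      intro m0
      refine (PySem.List.foldl_congr_mem (g := fun m (j : Nat) =>
        if tl.getD j 0 ≤ i ∧ PySem.List.pyGetD coins (i - tl.getD j 0) 0 + w.tail.getD j 0 < m
        then PySem.List.pyGetD coins (i - tl.getD j 0) 0 + w.tail.getD j 0 else m)
        _ _ _ ?_).trans (ih w.tail m0 hwtl)
      intro acc j _
      simp only [List.getD_cons_succ, pvGetD_tail]
    rcases w with _ | ⟨y, w'⟩
    · have hx : ¬ x ≤ i := by
        intro hxi
        have := hw 0 (by simp) (by simpa using hxi)
        simp at this
      rw [if_neg (by simp only [List.getD_cons_zero]; exact fun h => hx h.1)]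
      rw [hshift m]
      simp
    · simp only [List.zip_cons_cons, List.foldl_cons]
      have hhead : (if (x :: tl).getD 0 0 ≤ i ∧
            PySem.List.pyGetD coins (i - (x :: tl).getD 0 0) 0 + (y :: w').getD 0 0 < m
          then PySem.List.pyGetD coins (i - (x :: tl).getD 0 0) 0 + (y :: w').getD 0 0 else m)
          = (if x ≤ i then min m (f (i - x) + y) else m) := by
        simp only [List.getD_cons_zero]
        by_cases hxi : x ≤ i
        · have hc := (hw 0 (by simp) (by simpa using hxi)).2
          simp only [List.getD_cons_zero] at hc
          rw [hc, if_pos hxi, Int.min_def]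
          split_ifs <;> omega
        · rw [if_neg (fun h => hxi h.1), if_neg hxi]
      rw [hhead]
      exact hshift _

theorem pvStepA_eq_pvStepB (d w coins : List Int) (i : Int) (f : Int → Int)
    (hw : ∀ j : Nat, j < d.length → d.getD j 0 ≤ i →
      j < w.length ∧ PySem.List.pyGetD coins (i - d.getD j 0) 0 = f (i - d.getD j 0)) :
    pvStepA d w coins i = pvStepB d w f i := by
  unfold pvStepA pvStepB
  rw [PySem.List.pyRange_one]
  simp only [Int.sub_zero, Int.toNat_natCast, List.foldl_map]
  refine ((PySem.List.foldl_congr_mem (g := fun m (j : Nat) =>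
      if d.getD j 0 ≤ i ∧ PySem.List.pyGetD coins (i - d.getD j 0) 0 + w.getD j 0 < m
      then PySem.List.pyGetD coins (i - d.getD j 0) 0 + w.getD j 0 else m)
      _ _ _ ?_).trans ((pvStepAux coins i f d w 1000000 hw).trans ?_))
  · intro acc j _
    norm_num [PySem.List.pyGetD_natCast]
  · rfl

theorem pvCloseFold (i : Int) :
    ∀ (dl : List Int) (S fr : List Int), S.Nodup →
    ∃ new : List Int,
      dl.foldl (pvCloseStep i) (S, fr) = (S ++ new, fr ++ new) ∧ (S ++ new).Nodup ∧
      (∀ k ∈ new, k ∉ S ∧ ∃ dj ∈ dl, 0 < dj ∧ dj ≤ i ∧ k = i - dj) ∧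
      (∀ dj ∈ dl, 0 < dj → dj ≤ i → i - dj ∈ S ++ new) := by
  intro dl
  induction dl with
  | nil => intro S fr _; exact ⟨[], by simp, by simpa, by simp, by simp⟩
  | cons dj dl ih =>
    intro S fr hS
    rw [List.foldl_cons]
    by_cases hg : 0 < dj ∧ dj ≤ i
    · by_cases hc : PySem.Set.contains S (i - dj) = true
      · have hmem : i - dj ∈ S := by simpa using hc
        have hstep : pvCloseStep i (S, fr) dj = (S, fr) := by
          simp [pvCloseStep, hg, hmem]
        rw [hstep]
        obtain ⟨new, h1, h2, h3, h4⟩ := ih S fr hS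
        refine ⟨new, h1, h2, ?_, ?_⟩
        · intro k hk
          obtain ⟨hk1, dj', hd', hp⟩ := h3 k hk
          exact ⟨hk1, dj', by simp [hd'], hp⟩
        · intro e he h0 hi
          rcases List.mem_cons.mp he with rfl | he'
          · exact List.mem_append.mpr (Or.inl hmem)
          · exact h4 e he' h0 hi
      · have hnmem : i - dj ∉ S := by simpa using hc
        have hstep : pvCloseStep i (S, fr) dj = (S ++ [i - dj], fr ++ [i - dj]) := by
          simp only [pvCloseStep, if_pos hg, hc, Bool.false_eq_true, if_false,
            PySem.Set.add_of_not_mem hnmem]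
        rw [hstep]
        obtain ⟨new, h1, h2, h3, h4⟩ := ih (S ++ [i - dj]) (fr ++ [i - dj])
          (by simp [List.nodup_append, hS]; exact fun a ha h => hnmem (h ▸ ha))
        refine ⟨(i - dj) :: new, by simpa using h1, by simpa using h2, ?_, ?_⟩
        · intro k hk
          rcases List.mem_cons.mp hk with rfl | hk'
          · exact ⟨hnmem, dj, by simp, hg.1, hg.2, rfl⟩
          · obtain ⟨hk1, dj', hd', hp⟩ := h3 k hk'
            refine ⟨fun h => hk1 (by simp [h]), dj', by simp [hd'], hp⟩
        · intro e he h0 hi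
          rcases List.mem_cons.mp he with rfl | he'
          · simp
          · have := h4 e he' h0 hi
            simpa using this
    · have hstep : pvCloseStep i (S, fr) dj = (S, fr) := by simp [pvCloseStep, hg]
      rw [hstep]
      obtain ⟨new, h1, h2, h3, h4⟩ := ih S fr hS
      refine ⟨new, h1, h2, ?_, ?_⟩
      · intro k hk
        obtain ⟨hk1, dj', hd', hp⟩ := h3 k hk
        exact ⟨hk1, dj', by simp [hd'], hp⟩
      · intro e he h0 hi
        rcases List.mem_cons.mp he with rfl | he'
        · exact absurd ⟨h0, hi⟩ hg
        · exact h4 e he' h0 hi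

theorem pvNodupBound (v : Int) (hv : 0 ≤ v) (S : List Int) (h1 : S.Nodup) (h2 : ∀ x ∈ S, 0 ≤ x ∧ x ≤ v) :
    (S.length : Int) ≤ v + 1 := by
  have hsub : S.toFinset ⊆ Finset.Icc 0 v := by
    intro x hx
    rw [List.mem_toFinset] at hx
    exact Finset.mem_Icc.mpr ⟨(h2 x hx).1, (h2 x hx).2⟩
  have hcard := Finset.card_le_card hsub
  rw [List.toFinset_card_of_nodup h1, Int.card_Icc] at hcard
  omega

theorem pvClose_spec (d : List Int) (v : Int) (hv : 0 ≤ v) :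
    ∀ (fuel : Nat) (S fr : List Int), pvInv d v S fr →
      (fr.length : Int) + 2 * ((v + 1) - S.length) ≤ fuel →
      ∃ S', pvClose d fuel S fr = (S', []) ∧ pvInv d v S' [] ∧ ∀ x ∈ S, x ∈ S' := by
  intro fuel
  induction fuel with
  | zero =>
    intro S fr hInv hm
    obtain ⟨hS, hfr, hsub, hbd, hcl⟩ := hInv
    have hb := pvNodupBound v hv S hS hbd
    cases fr with
    | nil => exact ⟨S, rfl, ⟨hS, hfr, hsub, hbd, hcl⟩, fun x h => h⟩
    | cons x xs => exfalso; push_cast at hm; simp at hm; omega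
  | succ fuel ih =>
    intro S fr hInv hm
    obtain ⟨hS, hfr, hsub, hbd, hcl⟩ := hInv
    cases fr with
    | nil => exact ⟨S, rfl, ⟨hS, hfr, hsub, hbd, hcl⟩, fun x h => h⟩
    | cons x xs =>
      have hne : (x :: xs) ≠ ([] : List Int) := by simp
      set i := (x :: xs).getLast hne with hidef
      have hiS : i ∈ S := hsub _ (List.getLast_mem hne)
      have hibd := hbd i hiS
      obtain ⟨new, h1, h2, h3, h4⟩ := pvCloseFold i d S (x :: xs).dropLast hS
      have hfrl : (x :: xs).dropLast ++ [i] = x :: xs := List.dropLast_append_getLast hne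
      have hdropsub : ∀ a, a ∈ (x :: xs).dropLast → a ∈ (x :: xs) := by
        intro a ha; rw [← hfrl]; exact List.mem_append.mpr (Or.inl ha)
      have hnewS : ∀ k ∈ new, k ∉ S := fun k hk => (h3 k hk).1
      have hdropnd : (x :: xs).dropLast.Nodup := (List.dropLast_sublist _).nodup hfr
      have hinotdrop : i ∉ (x :: xs).dropLast := by
        intro hmem
        have hnd := hfrl ▸ hfr
        rw [List.nodup_append] at hnd
        exact hnd.2.2 i hmem i (by simp) rfl
      have hInv' : pvInv d v (S ++ new) ((x :: xs).dropLast ++ new) := by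
        refine ⟨h2, ?_, ?_, ?_, ?_⟩
        · rw [List.nodup_append]
          refine ⟨hdropnd, (List.nodup_append.mp h2).2.1, ?_⟩
          intro a ha b hb hab
          exact hnewS b hb (hab ▸ hsub a (hdropsub a ha))
        · intro a ha
          rcases List.mem_append.mp ha with h | h
          · exact List.mem_append.mpr (Or.inl (hsub a (hdropsub a h)))
          · exact List.mem_append.mpr (Or.inr h)
        · intro a ha
          rcases List.mem_append.mp ha with h | h
          · exact hbd a h
          · obtain ⟨_, dj, _, h0, hdji, rfl⟩ := h3 a h
            omega
        · intro a ha hnfr dj hdj h0 hdja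
          rcases List.mem_append.mp ha with h | h
          · by_cases hai : a = i
            · subst hai
              exact h4 dj hdj h0 hdja
            · have hanfr : a ∉ (x :: xs) := by
                intro hmem
                rw [← hfrl] at hmem
                rcases List.mem_append.mp hmem with h' | h'
                · exact hnfr (List.mem_append.mpr (Or.inl h'))
                · exact hai (by simpa using h')
              exact List.mem_append.mpr (Or.inl (hcl a h hanfr dj hdj h0 hdja))
          · exact absurd (List.mem_append.mpr (Or.inr h)) hnfr
      have hm' : (((x :: xs).dropLast ++ new).length : Int) + 2 * ((v + 1) - (S ++ new).length) ≤ fuel := by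
        have hl1 : (x :: xs).dropLast.length = xs.length := by simp
        simp only [List.length_append, hl1, List.length_cons] at hm ⊢
        push_cast at hm ⊢
        omega
      obtain ⟨S', hS', hInv'', hmono⟩ := ih (S ++ new) ((x :: xs).dropLast ++ new) hInv' hm'
      refine ⟨S', ?_, hInv'', fun y hy => hmono y (List.mem_append.mpr (Or.inl hy))⟩
      show pvClose d (fuel + 1) S (x :: xs) = (S', [])
      rw [show pvClose d (fuel + 1) S (x :: xs)
          = pvClose d fuel (d.foldl (pvCloseStep i) (S, (x :: xs).dropLast)).1
              (d.foldl (pvCloseStep i) (S, (x :: xs).dropLast)).2 from rfl]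
      rw [h1]
      exact hS'

theorem pvFold_get?_of_not_mem (d w : List Int) :
    ∀ (l : List Int) (memo : PySem.Dict Int Int) (k : Int), k ∉ l →
      (l.foldl (pvP2Step d w) memo).get? k = memo.get? k := by
  intro l
  induction l with
  | nil => intro memo k _; rfl
  | cons i l ih =>
    intro memo k hk
    rw [List.foldl_cons, ih _ k (fun h => hk (List.mem_cons.mpr (Or.inr h)))]
    have hki : k ≠ i := fun h => hk (List.mem_cons.mpr (Or.inl h))
    unfold pvP2Step
    split_ifs <;> exact PySem.Dict.get?_insert_of_ne _ _ hki


theorem pvG_recur (d w : List Int) (v i : Int)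
    (HP : v = 0 ∨ ∀ j : Nat, j < d.length → d.getD j 0 ≤ v → 0 < d.getD j 0 ∧ j < w.length)
    (h1 : 1 ≤ i) (h2 : i ≤ v) (f : Int → Int)
    (hf : ∀ p ∈ d.zip w, p.1 ≤ i → f (i - p.1) = pvG d w (i - p.1).toNat) :
    pvStepB d w f i = pvG d w i.toNat := by
  have HPr : ∀ j : Nat, j < d.length → d.getD j 0 ≤ v → 0 < d.getD j 0 ∧ j < w.length := by
    rcases HP with h | h
    · omega
    · exact h
  obtain ⟨k, hk⟩ : ∃ k : Nat, i = (k : Int) + 1 := ⟨(i - 1).toNat, by omega⟩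
  subst hk
  have hG : pvG d w ((k : Int) + 1).toNat = pvStepA d w (pvTblA d w (k : Int)) ((k : Int) + 1) := by
    rw [show ((k : Int) + 1).toNat = k + 1 by omega]
    exact pvG_succ d w k
  rw [hG]
  symm
  apply pvStepA_eq_pvStepB
  intro j hj htrig
  have hpre := HPr j hj (by omega)
  refine ⟨hpre.2, ?_⟩
  set dj := d.getD j 0 with hdj
  set t := (k : Int) + 1 - dj with ht
  have htb : 0 ≤ t ∧ t ≤ (k : Int) := by omega
  have hzip : (dj, w.getD j 0) ∈ d.zip w := by
    have hjz : j < (d.zip w).length := by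
      rw [List.length_zip]; omega
    have : (d.zip w)[j] = (d[j], w[j]) := List.getElem_zip
    rw [hdj, List.getD_eq_getElem d 0 hj]
    have := List.getElem_mem hjz
    rw [List.getElem_zip] at this
    rw [List.getD_eq_getElem w 0 hpre.2]
    exact this
  have hfval := hf _ hzip (by simpa using htrig)
  have hfval' : f ((k : Int) + 1 - dj) = pvG d w ((k : Int) + 1 - dj).toNat := by
    simpa using hfval
  have hgoal : PySem.List.pyGetD (pvTblA d w (k : Int)) ((k : Int) + 1 - dj) 0
      = pvG d w ((k : Int) + 1 - dj).toNat := by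
    rw [show (k : Int) + 1 - dj = ((((k : Int) + 1 - dj).toNat : Nat) : Int) by omega,
      PySem.List.pyGetD_natCast]
    exact getD_pvTblA d w k _ (by omega)
  rw [hgoal, ← hfval']

theorem pvPhase2 (d w : List Int) (v : Int)
    (HP : v = 0 ∨ ∀ j : Nat, j < d.length → d.getD j 0 ≤ v → 0 < d.getD j 0 ∧ j < w.length) :
    ∀ (rest : List Int) (memo : PySem.Dict Int Int),
    rest.Pairwise (· < ·) →
    (∀ x ∈ rest, 0 ≤ x ∧ x ≤ v) →
    (∀ x ∈ rest, ∀ dj ∈ d, 0 < dj → dj ≤ x →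
      (x - dj ∈ rest ∨ memo.get? (x - dj) = some (pvG d w (x - dj).toNat))) →
    ∀ x ∈ rest, (rest.foldl (pvP2Step d w) memo).get? x = some (pvG d w x.toNat) := by
  intro rest
  induction rest with
  | nil => intro memo _ _ _ x hx; simp at hx
  | cons i rest ih =>
    intro memo hpw hbd hch x hx
    have hibd := hbd i (by simp)
    have hlt : ∀ y ∈ rest, i < y := (List.pairwise_cons.mp hpw).1
    -- the value inserted for i is pvG i.toNat
    have hval : pvP2Step d w memo i = memo.insert i (pvG d w i.toNat) := by
      unfold pvP2Step
      by_cases hi0 : i = 0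
      · subst hi0
        rw [if_pos rfl]; simp [pvG_zero]
      · rw [if_neg hi0]
        congr 1
        apply pvG_recur d w v i HP (by omega) hibd.2
        intro p hp hpi
        have hch' := hch i (by simp) p.1 (List.of_mem_zip hp).1
        by_cases hppos : 0 < p.1
        · rcases hch' hppos hpi with hmem | hsome
          · exfalso
            rcases List.mem_cons.mp hmem with h | h
            · omega
            · have := hlt _ h; omega
          · rw [PySem.Dict.getD_eq_get?_getD, hsome]; rfl
        · -- impossible inside Pre_: a triggered denomination is positive
          exfalso
          rcases HP with h | h
          · omega
          · obtain ⟨j, hj, hdj⟩ : ∃ j : Nat, j < d.length ∧ d.getD j 0 = p.1 := by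
              obtain ⟨j, hj, hg⟩ := List.getElem_of_mem (List.of_mem_zip hp).1
              exact ⟨j, hj, by rw [List.getD_eq_getElem d 0 hj, hg]⟩
            have := h j hj (by omega)
            omega
    rw [List.foldl_cons, hval]
    rcases List.mem_cons.mp hx with rfl | hx'
    · rw [pvFold_get?_of_not_mem d w rest _ x (fun h => by have := hlt x h; omega)]
      exact PySem.Dict.get?_insert_self _ _ _
    · apply ih _ (List.pairwise_cons.mp hpw).2 (fun y hy => hbd y (by simp [hy]))
      · intro y hy dj hdj h0 hdjy
        rcases hch y (by simp [hy]) dj hdj h0 hdjy with hmem | hsome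
        · rcases List.mem_cons.mp hmem with h | h
          · subst h
            right
            rw [PySem.Dict.get?_insert_self]
          · left; exact h
        · by_cases hyi : y - dj = i
          · right
            rw [hyi, PySem.Dict.get?_insert_self]
          · right
            rw [PySem.Dict.get?_insert_of_ne _ _ hyi]
            exact hsome
      · exact hx'


-- ===== VERDICT (by name: the statement is the Claim_ definition above) =====
theorem min_weight_coins_spec : Claim_equal_min_weight_coins := by
  intro d w v _ hpre
  obtain ⟨hv, HP⟩ := hpre
  unfold Spec_min_weight_coins
  obtain ⟨n, rfl⟩ : ∃ n : Nat, v = (n : Int) := ⟨v.toNat, by omega⟩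
  -- A's result is the table value pvG n
  have hA : min_weight_coins d w (n : Int) = pvG d w n := by
    unfold min_weight_coins pvG
    rw [PySem.List.pyGetD_natCast]
  -- B phase 1: the closure loop empties its frontier and returns a closed needed-set
  have hInv0 : pvInv d (n : Int) [(n : Int)] [(n : Int)] := by
    refine ⟨List.nodup_singleton _, List.nodup_singleton _, by simp, by simp, ?_⟩
    intro x hx hnx
    simp at hx
    simp [hx] at hnx
  obtain ⟨S', hS', hInvS, hmono⟩ := pvClose_spec d (n : Int) (by omega)
    (2 * (n : Int).toNat + 3) [(n : Int)] [(n : Int)] hInv0 (by push_cast; simp; omega)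
  obtain ⟨hSnd, _, _, hSbd, hScl⟩ := hInvS
  have hvS : (n : Int) ∈ S' := hmono _ (by simp)
  -- phase 2 over sorted(needed)
  set L := PySem.List.sorted S' (fun x => x) false with hL
  have hperm : L.Perm S' := PySem.List.sorted_perm _ _ _
  have hLnd : L.Nodup := hperm.nodup_iff.mpr hSnd
  have hLpw : L.Pairwise (· < ·) := by
    have h1 : L.Pairwise (fun a b => a ≤ b) := by
      simpa using PySem.List.sorted_pairwise (xs := S') (key := fun x => x)
    have := h1.and hLnd
    exact this.imp (fun h => by omega)
  have hmem : ∀ x, x ∈ L ↔ x ∈ S' := fun x => hperm.mem_iff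
  have hget := pvPhase2 d w (n : Int) HP L PySem.Dict.empty hLpw
    (fun x hx => hSbd x ((hmem x).mp hx))
    (fun x hx dj hdj h0 hdjx => Or.inl
      ((hmem _).mpr (hScl x ((hmem x).mp hx) (by simp) dj hdj h0 hdjx)))
    (n : Int) ((hmem _).mpr hvS)
  have hB : min_weight_coins_alt d w (n : Int) = pvG d w n := by
    unfold min_weight_coins_alt
    rw [show PySem.Set.ofList [(n : Int)] = [(n : Int)] from rfl]
    rw [hS']
    simp only [← hL]
    rw [PySem.Dict.getD_eq_get?_getD, hget]
    simp
  rw [hA, hB]
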